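-- pv_equiv track=rewrite | github.com/LOUIS-AMC/Tiny_Travel_Guide | scripts/rag.py | normalize_boroughs
-- ===== SOURCE A (Python) =====
-- from typing import Iterable, List, Optional
--
-- BOROUGH_ALIASES = {
--     "manhattan": "Manhattan",
--     "brooklyn": "Brooklyn",
--     "queens": "Queens",
--     "bronx": "Bronx",
--     "staten island": "Staten Island",
--     "staten_island": "Staten Island",
--     "statenisland": "Staten Island",
-- }
--
-- def normalize_boroughs(raw_boros: Iterable[str]) -> List[str]:
--     """Normalize user-provided borough names to dataset labels."""
--     names = []
--     for boro in raw_boros: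
--         key = (boro or "").strip().lower()
--         if not key:
--             continue
--         if key in BOROUGH_ALIASES:
--             names.append(BOROUGH_ALIASES[key])
--     # Deduplicate while preserving order.
--     seen = set()
--     ordered = []
--     for name in names:
--         if name not in seen:
--             ordered.append(name)
--             seen.add(name)
--     return ordered
-- ===== SOURCE B (Python) =====
-- BOROUGH_ALIASES = {
--     "manhattan": "Manhattan",
--     "brooklyn": "Brooklyn",
--     "queens": "Queens",
--     "bronx": "Bronx",
--     "staten island": "Staten Island",
--     "staten_island": "Staten Island",
--     "statenisland": "Staten Island",
-- }
--
-- def normalize_boroughs(raw_boros):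
--     """Normalize via a comprehension, then dedup by head-and-filter recursion (no seen set)."""
--     names = [BOROUGH_ALIASES[k]
--              for k in ((b or "").strip().lower() for b in raw_boros)
--              if k in BOROUGH_ALIASES]
--
--     def dedup(xs):
--         if not xs:
--             return []
--         head = xs[0]
--         return [head] + dedup([x for x in xs[1:] if x != head])
--
--     return dedup(names)
-- ===== Notes on version B (the rewrite author's own statement) =====
-- stated objective: alternative
-- what changed: Replaces A's seen-set streaming dedup with a head-and-filter recursive dedup (take the first name, recurse on the tail with all its copies filtered out; no auxiliary set or mutable state), and A's filter/map loop with a comprehension.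
import Mathlib
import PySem

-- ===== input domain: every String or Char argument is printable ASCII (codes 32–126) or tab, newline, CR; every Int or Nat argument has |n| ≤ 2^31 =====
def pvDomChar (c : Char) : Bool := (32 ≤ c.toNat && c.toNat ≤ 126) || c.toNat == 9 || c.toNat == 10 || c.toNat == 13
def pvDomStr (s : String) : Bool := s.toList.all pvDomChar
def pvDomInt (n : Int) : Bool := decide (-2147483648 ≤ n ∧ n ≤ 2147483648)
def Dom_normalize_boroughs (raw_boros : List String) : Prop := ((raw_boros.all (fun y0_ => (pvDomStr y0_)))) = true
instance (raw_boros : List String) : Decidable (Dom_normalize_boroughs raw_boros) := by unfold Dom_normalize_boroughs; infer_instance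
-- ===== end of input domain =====

-- B replaces A's seen-set streaming dedup with a head-and-filter recursive dedup and A's
-- filter/map loop with a comprehension; objective: alternative (similar cost).


-- ===== PORT A =====
def BOROUGH_ALIASES : PySem.Dict String String :=
  PySem.Dict.ofList [("manhattan", "Manhattan"), ("brooklyn", "Brooklyn"), ("queens", "Queens"),
   ("bronx", "Bronx"), ("staten island", "Staten Island"),
   ("staten_island", "Staten Island"), ("statenisland", "Staten Island")]

-- key = (boro or "").strip().lower(); `boro or ""` is the identity on str
def pvKey (boro : String) : String := PySem.Str.lower (PySem.Str.strip boro)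

-- first loop of A: build the intermediate `names` list
def pvNamesStep (acc : List String) (boro : String) : List String :=
  if pvKey boro = "" then acc
  else match PySem.Dict.get? BOROUGH_ALIASES (pvKey boro) with
    | some v => acc ++ [v]
    | none => acc

-- second loop of A: dedup preserving order, state (seen, ordered)
def pvDedupStep (st : PySem.Set String × List String) (name : String) :
    PySem.Set String × List String :=
  if PySem.Set.contains st.1 name then st else (PySem.Set.add st.1 name, st.2 ++ [name])

def normalize_boroughs (raw_boros : List String) : List String :=
  let names := raw_boros.foldl pvNamesStep []
  (names.foldl pvDedupStep (PySem.Set.empty, [])).2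

-- ===== PORT B =====
-- B's recursive dedup: keep the head, recurse on the tail with the head's copies removed
def pvDedupRec : List String → List String
  | [] => []
  | h :: t => h :: pvDedupRec (t.filter (fun x => x ≠ h))
termination_by xs => xs.length
decreasing_by
  simp only [List.length_cons, Nat.lt_succ_iff, List.length_unattach]
  exact le_trans (List.length_filter_le _ _) (le_of_eq List.length_attach)

def normalize_boroughs_alt (raw_boros : List String) : List String :=
  -- the comprehension: for each b, k = (b or "").strip().lower(); keep BOROUGH_ALIASES[k] if k in dict
  let names := (raw_boros.map pvKey).filterMap (fun k => PySem.Dict.get? BOROUGH_ALIASES k)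
  pvDedupRec names

-- ===== PRECONDITION & SPEC =====
def Spec_normalize_boroughs (raw_boros : List String) (out : List String) : Prop := out = normalize_boroughs_alt raw_boros
instance (raw_boros : List String) (out : List String) : Decidable (Spec_normalize_boroughs raw_boros out) := by unfold Spec_normalize_boroughs; infer_instance

-- ===== CLAIM (what is proved, stated in full; the proofs are below) =====
def Claim_equal_normalize_boroughs : Prop := ∀ (raw_boros : List String), Dom_normalize_boroughs raw_boros → Spec_normalize_boroughs raw_boros (normalize_boroughs raw_boros)

-- ===== LEMMAS AND PROOFS =====

theorem pvDedupRec_nil : pvDedupRec [] = [] := by rw [pvDedupRec.eq_def]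

theorem pvDedupRec_cons (h : String) (t : List String) :
    pvDedupRec (h :: t) = h :: pvDedupRec (t.filter (fun x => !decide (x = h))) := by
  rw [pvDedupRec.eq_def]
  simp

-- A's first loop with any accumulator is the accumulator followed by the run from [].
theorem pvNames_acc (raw : List String) (acc : List String) :
    raw.foldl pvNamesStep acc = acc ++ raw.foldl pvNamesStep [] := by
  induction raw generalizing acc with
  | nil => simp
  | cons b t ih =>
      simp only [List.foldl_cons]
      rw [ih (pvNamesStep acc b), ih (pvNamesStep [] b)]
      have : pvNamesStep acc b = acc ++ pvNamesStep [] b := by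
        unfold pvNamesStep
        split_ifs with h
        · simp
        · cases PySem.Dict.get? BOROUGH_ALIASES (pvKey b) <;> simp
      rw [this, List.append_assoc]

-- A's first loop builds exactly B's comprehension (the empty key is not in the dict).
theorem pvNames_eq (raw : List String) :
    raw.foldl pvNamesStep [] =
      (raw.map pvKey).filterMap (fun k => PySem.Dict.get? BOROUGH_ALIASES k) := by
  induction raw with
  | nil => rfl
  | cons b t ih =>
      rw [List.foldl_cons, pvNames_acc t (pvNamesStep [] b), ih,
          List.map_cons, List.filterMap_cons]
      by_cases h : pvKey b = ""
      · have hnone : PySem.Dict.get? BOROUGH_ALIASES (pvKey b) = none := by rw [h]; decide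
        have hstep : pvNamesStep [] b = [] := by unfold pvNamesStep; rw [if_pos h]
        rw [hstep, hnone, List.nil_append]
      · have hstep : pvNamesStep [] b = (PySem.Dict.get? BOROUGH_ALIASES (pvKey b)).toList := by
          unfold pvNamesStep
          rw [if_neg h]
          cases PySem.Dict.get? BOROUGH_ALIASES (pvKey b) <;> rfl
        rw [hstep]
        cases PySem.Dict.get? BOROUGH_ALIASES (pvKey b) <;> rfl

-- A's seen-set dedup fold, started at (s, ord), is ord followed by B's recursive dedup of
-- the names not already seen in s.
theorem pvDedup_eq (names : List String) (s : PySem.Set String) (ord : List String) :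
    (names.foldl pvDedupStep (s, ord)).2 =
      ord ++ pvDedupRec (names.filter (fun x => !decide (x ∈ s))) := by
  induction names generalizing s ord with
  | nil => simp [pvDedupRec_nil]
  | cons h t ih =>
      simp only [List.foldl_cons, List.filter_cons]
      by_cases hm : h ∈ s
      · have hstep : pvDedupStep (s, ord) h = (s, ord) := by simp [pvDedupStep, hm]
        rw [hstep, ih s ord]
        simp [hm]
      · have hstep : pvDedupStep (s, ord) h = (s ++ [h], ord ++ [h]) := by
          simp [pvDedupStep, hm]
        have hfilt : t.filter (fun x => !decide (x ∈ s ++ [h]))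
            = (t.filter (fun x => !decide (x ∈ s))).filter (fun x => !decide (x = h)) := by
          rw [List.filter_filter]
          apply List.filter_congr
          intro x _
          by_cases hx : x = h <;> by_cases hxs : x ∈ s <;> simp [hx, hxs]
        rw [hstep, ih (s ++ [h]) (ord ++ [h]), hfilt]
        simp [hm, pvDedupRec_cons]

-- ===== VERDICT (by name: the statement is the Claim_ definition above) =====
theorem normalize_boroughs_spec : Claim_equal_normalize_boroughs := by
  intro raw _
  unfold Spec_normalize_boroughs normalize_boroughs normalize_boroughs_alt
  rw [pvNames_eq, pvDedup_eq, List.nil_append]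
  have hf : ∀ names : List String,
      names.filter (fun x => !decide (x ∈ (PySem.Set.empty : PySem.Set String))) = names := by
    intro names
    apply List.filter_eq_self.mpr
    intro a _
    simp [PySem.Set.empty]
  rw [hf]
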